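-- pv_equiv track=rewrite | github.com/itamarf1/invest | src/trading/brokers/auth_manager.py | validate_credentials
-- ===== SOURCE A (Python) =====
-- from typing import Dict, Optional, List, Tuple
--
-- def validate_credentials(broker_name: str, credentials: Dict) -> Tuple[bool, str]:
--     """Validate broker credentials"""
--     try:
--         # Basic validation based on broker type
--         broker_key = broker_name.lower()
--
--         if 'alpaca' in broker_key:
--             required = ['api_key', 'secret_key']
--             if all(credentials.get(field) for field in required):
--                 return True, "Alpaca credentials look valid"
--             else:
--                 return False, f"Missing required fields: {[f for f in required if not credentials.get(f)]}"
--
--         elif 'ibkr' in broker_key or 'interactive' in broker_key: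
--             # IBKR just needs host and port typically
--             return True, "IBKR credentials look valid"
--
--         elif 'td' in broker_key or 'ameritrade' in broker_key:
--             required = ['client_id']
--             if all(credentials.get(field) for field in required):
--                 return True, "TD Ameritrade credentials look valid"
--             else:
--                 return False, f"Missing required fields: {[f for f in required if not credentials.get(f)]}"
--
--         elif 'etrade' in broker_key:
--             required = ['consumer_key', 'consumer_secret']
--             if all(credentials.get(field) for field in required):
--                 return True, "E*TRADE credentials look valid"
--             else:
--                 return False, f"Missing required fields: {[f for f in required if not credentials.get(f)]}"
--
--         elif 'schwab' in broker_key: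
--             required = ['client_id', 'client_secret']
--             if all(credentials.get(field) for field in required):
--                 return True, "Schwab credentials look valid"
--             else:
--                 return False, f"Missing required fields: {[f for f in required if not credentials.get(f)]}"
--
--         else:
--             return True, "Unknown broker type, cannot validate"
--
--     except Exception as e:
--         return False, f"Error validating credentials: {str(e)}"
-- ===== SOURCE B (Python) =====
-- # Staged rewrite: one pass collects ALL matched keyword rules (no short-circuit),
-- # then min() by priority picks the winning rule; validation is uniform.
-- _RULES = {
--     'alpaca':      (0, 'Alpaca', ['api_key', 'secret_key']),
--     'ibkr':        (1, 'IBKR', []),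
--     'interactive': (1, 'IBKR', []),
--     'td':          (2, 'TD Ameritrade', ['client_id']),
--     'ameritrade':  (2, 'TD Ameritrade', ['client_id']),
--     'etrade':      (3, 'E*TRADE', ['consumer_key', 'consumer_secret']),
--     'schwab':      (4, 'Schwab', ['client_id', 'client_secret']),
-- }
--
-- def validate_credentials(broker_name, credentials):
--     try:
--         key = broker_name.lower()
--         hits = [rule for kw, rule in _RULES.items() if kw in key]
--         if not hits:
--             return True, "Unknown broker type, cannot validate"
--         _, name, required = min(hits, key=lambda r: r[0])
--         missing = [f for f in required if not credentials.get(f)]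
--         if missing:
--             return False, f"Missing required fields: {missing}"
--         return True, f"{name} credentials look valid"
--     except Exception as e:
--         return False, f"Error validating credentials: {str(e)}"
-- ===== Notes on version B (the rewrite author's own statement) =====
-- stated objective: alternative
-- what changed: Instead of A's short-circuiting elif chain, B first collects ALL matched keyword rules in one pass over a keyword->(priority,name,required) map, then selects the winner with min() by priority and validates uniformly.
import Mathlib
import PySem

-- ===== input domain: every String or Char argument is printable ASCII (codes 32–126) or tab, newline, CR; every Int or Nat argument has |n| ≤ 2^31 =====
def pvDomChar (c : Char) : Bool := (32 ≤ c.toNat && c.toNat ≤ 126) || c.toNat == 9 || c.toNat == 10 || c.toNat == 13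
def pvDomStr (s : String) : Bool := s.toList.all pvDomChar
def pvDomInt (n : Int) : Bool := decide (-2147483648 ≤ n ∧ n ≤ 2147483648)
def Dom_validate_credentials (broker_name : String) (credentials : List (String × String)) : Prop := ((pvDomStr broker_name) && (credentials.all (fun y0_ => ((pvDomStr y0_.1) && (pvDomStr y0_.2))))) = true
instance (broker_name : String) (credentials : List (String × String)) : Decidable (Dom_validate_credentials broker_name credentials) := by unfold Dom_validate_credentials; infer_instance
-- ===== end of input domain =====

-- B collects ALL matched keyword rules in one pass and selects the winner by min-priority
-- (no short-circuit), instead of A's elif chain (objective: alternative); messages verbatim.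

-- ===== PORT A =====
-- credentials.get(field) truthiness: present with a non-empty string value
def pvCredTruthy (credentials : List (String × String)) (field : String) : Bool :=
  match (PySem.Dict.mk credentials).get? field with
  | none => false
  | some v => !(v == "")

-- f"...{missing}" renders the Python list repr: ['a', 'b'] (field names are quote-free literals)
def pvReprStrList (xs : List String) : String :=
  "[" ++ PySem.Str.join ", " (xs.map (fun f => "'" ++ f ++ "'")) ++ "]"

def validate_credentials (broker_name : String) (credentials : List (String × String)) : Bool × String :=
  let broker_key := PySem.Str.lower broker_name
  if PySem.Str.isIn "alpaca" broker_key then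
    let required := ["api_key", "secret_key"]
    if required.all (fun field => pvCredTruthy credentials field) then
      (true, "Alpaca credentials look valid")
    else
      (false, "Missing required fields: " ++ pvReprStrList (required.filter (fun f => !pvCredTruthy credentials f)))
  else if PySem.Str.isIn "ibkr" broker_key || PySem.Str.isIn "interactive" broker_key then
    (true, "IBKR credentials look valid")
  else if PySem.Str.isIn "td" broker_key || PySem.Str.isIn "ameritrade" broker_key then
    let required := ["client_id"]
    if required.all (fun field => pvCredTruthy credentials field) then
      (true, "TD Ameritrade credentials look valid")
    else
      (false, "Missing required fields: " ++ pvReprStrList (required.filter (fun f => !pvCredTruthy credentials f)))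
  else if PySem.Str.isIn "etrade" broker_key then
    let required := ["consumer_key", "consumer_secret"]
    if required.all (fun field => pvCredTruthy credentials field) then
      (true, "E*TRADE credentials look valid")
    else
      (false, "Missing required fields: " ++ pvReprStrList (required.filter (fun f => !pvCredTruthy credentials f)))
  else if PySem.Str.isIn "schwab" broker_key then
    let required := ["client_id", "client_secret"]
    if required.all (fun field => pvCredTruthy credentials field) then
      (true, "Schwab credentials look valid")
    else
      (false, "Missing required fields: " ++ pvReprStrList (required.filter (fun f => !pvCredTruthy credentials f)))
  else
    (true, "Unknown broker type, cannot validate")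

-- ===== PORT B =====
-- _RULES: keyword -> (priority, broker name, required fields), insertion order
def pvRules : List (String × (Nat × String × List String)) :=
  [ ("alpaca",      (0, "Alpaca", ["api_key", "secret_key"])),
    ("ibkr",        (1, "IBKR", [])),
    ("interactive", (1, "IBKR", [])),
    ("td",          (2, "TD Ameritrade", ["client_id"])),
    ("ameritrade",  (2, "TD Ameritrade", ["client_id"])),
    ("etrade",      (3, "E*TRADE", ["consumer_key", "consumer_secret"])),
    ("schwab",      (4, "Schwab", ["client_id", "client_secret"])) ]

def validate_credentials_alt (broker_name : String) (credentials : List (String × String)) : Bool × String :=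
  let key := PySem.Str.lower broker_name
  let hits := (pvRules.filter (fun r => PySem.Str.isIn r.1 key)).map Prod.snd
  -- min(hits, key=lambda r: r[0]): PySem.List.min? returns the FIRST minimal element,
  -- and none exactly when hits == [] (Python's "if not hits" branch)
  match PySem.List.min? hits (fun r => r.1) with
  | none => (true, "Unknown broker type, cannot validate")
  | some (_, name, required) =>
    let missing := required.filter (fun f => !pvCredTruthy credentials f)
    if !missing.isEmpty then
      (false, "Missing required fields: " ++ pvReprStrList missing)
    else
      (true, name ++ " credentials look valid")

-- ===== PRECONDITION & SPEC =====
def Spec_validate_credentials (broker_name : String) (credentials : List (String × String)) (out : Bool × String) : Prop := out = validate_credentials_alt broker_name credentials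
instance (broker_name : String) (credentials : List (String × String)) (out : Bool × String) : Decidable (Spec_validate_credentials broker_name credentials out) := by unfold Spec_validate_credentials; infer_instance

-- ===== CLAIM =====
def Claim_equal_validate_credentials : Prop := ∀ (broker_name : String) (credentials : List (String × String)), Dom_validate_credentials broker_name credentials → Spec_validate_credentials broker_name credentials (validate_credentials broker_name credentials)

-- ===== LEMMAS AND PROOFS =====
-- all(p over l) succeeds exactly when the list of failures is empty
theorem all_eq_isEmpty_filter_not {α : Type} (p : α → Bool) (l : List α) :
    l.all p = (l.filter (fun x => !p x)).isEmpty := by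
  induction l with
  | nil => rfl
  | cons x xs ih => by_cases h : p x = true <;> simp [h, ih]

-- ===== VERDICT =====
theorem validate_credentials_spec : Claim_equal_validate_credentials := by
  intro broker_name credentials _
  show validate_credentials broker_name credentials = validate_credentials_alt broker_name credentials
  simp only [validate_credentials, validate_credentials_alt, pvRules]
  by_cases h1 : PySem.Chars.isIn ['a','l','p','a','c','a'] (PySem.Chars.lower broker_name.toList) = true <;>
  by_cases h2 : PySem.Chars.isIn ['i','b','k','r'] (PySem.Chars.lower broker_name.toList) = true <;>
  by_cases h3 : PySem.Chars.isIn ['i','n','t','e','r','a','c','t','i','v','e'] (PySem.Chars.lower broker_name.toList) = true <;>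
  by_cases h4 : PySem.Chars.isIn ['t','d'] (PySem.Chars.lower broker_name.toList) = true <;>
  by_cases h5 : PySem.Chars.isIn ['a','m','e','r','i','t','r','a','d','e'] (PySem.Chars.lower broker_name.toList) = true <;>
  by_cases h6 : PySem.Chars.isIn ['e','t','r','a','d','e'] (PySem.Chars.lower broker_name.toList) = true <;>
  by_cases h7 : PySem.Chars.isIn ['s','c','h','w','a','b'] (PySem.Chars.lower broker_name.toList) = true <;>
  simp [h1, h2, h3, h4, h5, h6, h7, List.filter, PySem.List.min?,
    all_eq_isEmpty_filter_not]
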